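-- pv_equiv track=rewrite | github.com/Symbolk/AlgInPy | kickstart/3.py | solve
-- ===== SOURCE A (Python) =====
-- def solve(strr):
--     w = 0
--     h = 0
--
--     # use stack to store the repeat times
--     depth = [1]
--     # current step length
--     curr = 1
--
--     for i, s in enumerate(strr):
--         if s == "(":
--             # append the repeat times (number [0, 9])
--             depth.append(int(strr[i - 1]))
--             # increase the step length by times
--             curr = curr * depth[-1]
--         if s == ")":
--             # done with the last repeat subseq(...)
--             last = depth.pop()
--             # restore the step length (think as the multiplication formula)
--             curr = curr // last
--
--         if s == "W":
--             w -= curr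
--         if s == "E":
--             w += curr
--
--         if s == "N":
--             h -= curr
--         if s == "S":
--             h += curr
--
--     # move in loop: %
--     return w % (10 ** 9), h % (10 ** 9)
-- ===== SOURCE B (Python) =====
-- def solve(strr):
--     n = len(strr)
--
--     def segment(i):
--         # Displacement of one segment of the move program: scan from i until an
--         # unmatched ')' (consumed) or the end of the string; nested groups are
--         # evaluated recursively and scaled by their repeat digit on return.
--         w = 0
--         h = 0
--         while i < n:
--             c = strr[i]
--             if c == ')':
--                 return w, h, i + 1
--             if c == '(':
--                 d = int(strr[i - 1])
--                 sw, sh, i = segment(i + 1)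
--                 w += d * sw
--                 h += d * sh
--             else:
--                 w += (c == 'E') - (c == 'W')
--                 h += (c == 'S') - (c == 'N')
--                 i += 1
--         return w, h, i
--
--     w = 0
--     h = 0
--     i = 0
--     while i < n:
--         sw, sh, i = segment(i)
--         w += sw
--         h += sh
--     return w % 10 ** 9, h % 10 ** 9
-- ===== Notes on version B (the rewrite author's own statement) =====
-- stated objective: alternative
-- what changed: B evaluates the move program by recursive descent over the nesting structure - each parenthesized group is parsed as its own segment whose local displacement is computed with unit steps and scaled by its repeat digit on return - instead of A's flat left-to-right scan that maintains a stack of multipliers and a running step length restored by integer division.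
-- outside the precondition, e.g. on solve('0(E'): A returns (0, 0), B returns (0, 0); on solve('0(E)'): A raises ZeroDivisionError, B returns (0, 0); on solve('x(E'): A raises ValueError, B raises ValueError
import Mathlib
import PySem

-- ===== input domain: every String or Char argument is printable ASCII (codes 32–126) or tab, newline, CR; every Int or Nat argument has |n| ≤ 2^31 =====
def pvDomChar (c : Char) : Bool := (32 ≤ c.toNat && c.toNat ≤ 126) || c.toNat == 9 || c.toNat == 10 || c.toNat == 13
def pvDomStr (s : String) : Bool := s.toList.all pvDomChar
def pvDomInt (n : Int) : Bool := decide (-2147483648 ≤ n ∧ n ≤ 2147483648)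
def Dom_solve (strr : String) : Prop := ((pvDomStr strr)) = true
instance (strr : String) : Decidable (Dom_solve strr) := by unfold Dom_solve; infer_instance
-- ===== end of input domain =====

-- B replaces A's flat scan (stack of multipliers, running step length restored by division)
-- with a recursive descent over the nesting structure: each group is evaluated as its own
-- segment with unit steps and scaled by its repeat digit on return (objective: alternative).

-- ===== PORT A =====
-- int(strr[i-1]) for a one-character slice: exact when that character is a digit
-- (guaranteed by Pre_solve); Python raises ValueError/IndexError where pyGet? is none.
def digitAt (cs : List Char) (i : Int) : Int :=
  match PySem.List.pyGet? cs i with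
  | some c => (c.toNat : Int) - 48
  | none => 0

def loopA (cs : List Char) : List Char → Nat → Int → Int → List Int → Int → Int × Int
  | [], _, w, h, _, _ => (w, h)
  | s :: rest, i, w, h, depth, curr =>
    -- if s == "(": depth.append(int(strr[i-1])); curr = curr * depth[-1]
    let (depth, curr) :=
      if s = '(' then
        let d := digitAt cs ((i : Int) - 1)
        (depth ++ [d], curr * d)
      else (depth, curr)
    -- if s == ")": last = depth.pop(); curr = curr // last
    let (depth, curr) :=
      if s = ')' then
        match depth.getLast? with
        | some last => (depth.dropLast, PySem.Int.floordiv curr last)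
        | none => (depth, curr)   -- Python raises IndexError here; outside Pre_solve
      else (depth, curr)
    let w := if s = 'W' then w - curr else w
    let w := if s = 'E' then w + curr else w
    let h := if s = 'N' then h - curr else h
    let h := if s = 'S' then h + curr else h
    loopA cs rest (i + 1) w h depth curr

def solve (strr : String) : Int × Int :=
  let cs := strr.toList
  let p := loopA cs cs 0 0 0 [1] 1
  (PySem.Int.mod p.1 (10 ^ 9), PySem.Int.mod p.2 (10 ^ 9))

-- ===== PORT B =====
-- segment(i) of Source B: displacement of one segment, scanning until an unmatched ')'
-- (consumed) or the end; nested groups evaluated recursively and scaled by their digit.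
-- The `fuel` argument is only a termination device: one unit is consumed per processed
-- character, so `n + 1` units never run out (proved in the lemmas below).
def segB (cs : List Char) (n : Nat) : Nat → Nat → Int → Int → Int × Int × Nat
  | 0, i, w, h => (w, h, i)
  | fuel + 1, i, w, h =>
    if i < n then
      let c := cs.getD i ' '
      if c = ')' then (w, h, i + 1)
      else if c = '(' then
        let d := digitAt cs ((i : Int) - 1)
        let r := segB cs n fuel (i + 1) 0 0
        segB cs n fuel r.2.2 (w + d * r.1) (h + d * r.2.1)
      else
        segB cs n fuel (i + 1)
          (w + ((if c = 'E' then 1 else 0) - (if c = 'W' then 1 else 0)))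
          (h + ((if c = 'S' then 1 else 0) - (if c = 'N' then 1 else 0)))
    else (w, h, i)

-- the top-level while loop of Source B: sum the segments
def topB (cs : List Char) (n : Nat) : Nat → Nat → Int → Int → Int × Int
  | 0, _, w, h => (w, h)
  | fuel + 1, i, w, h =>
    if i < n then
      let r := segB cs n (n + 1) i 0 0
      topB cs n fuel r.2.2 (w + r.1) (h + r.2.1)
    else (w, h)

def solve_alt (strr : String) : Int × Int :=
  let cs := strr.toList
  let n := cs.length
  let p := topB cs n (n + 1) 0 0 0
  (PySem.Int.mod p.1 (10 ^ 9), PySem.Int.mod p.2 (10 ^ 9))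

-- ===== PRECONDITION & SPEC =====
-- True for the char Python's int() turns into a usable (non-zero) multiplier.
def isMult (o : Option Char) : Bool :=
  match o with
  | some c => decide (49 ≤ c.toNat ∧ c.toNat ≤ 57)   -- '1'..'9'
  | none => false

-- Pre_ excludes: (a) a '(' whose preceding character (Python index i-1, so the LAST character
-- when the '(' is first) is not a digit '1'..'9' — there A raises ValueError on int(), or, for
-- the digit '0', raises ZeroDivisionError at the matching ')' (when unmatched A returns the
-- same value as B, see cites); (b) a prefix with two more ')' than '(' — there A raises
-- IndexError popping the empty stack.
def Pre_solve (strr : String) : Prop :=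
  (∀ j, j < strr.toList.length → strr.toList[j]? = some '(' →
      isMult (PySem.List.pyGet? strr.toList ((j : Int) - 1)) = true) ∧
  (∀ n, n < strr.toList.length + 1 →
      ((strr.toList.take n).count ')') ≤ ((strr.toList.take n).count '(') + 1)

instance (strr : String) : Decidable (Pre_solve strr) := by unfold Pre_solve; infer_instance

def pvWitness_solve : String := "2(SE)W"

def Spec_solve (strr : String) (out : Int × Int) : Prop := out = solve_alt strr
instance (strr : String) (out : Int × Int) : Decidable (Spec_solve strr out) := by unfold Spec_solve; infer_instance

-- ===== CLAIM (what is proved, stated in full; the proofs are below) =====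
def Claim_equal_solve : Prop := ∀ (strr : String), Dom_solve strr → Pre_solve strr → Spec_solve strr (solve strr)

-- ===== LEMMAS AND PROOFS =====

-- index monotonicity of segB
theorem segB_idx (cs : List Char) (n : Nat) :
    ∀ fuel i (w h : Int), i ≤ n →
      i ≤ (segB cs n fuel i w h).2.2 ∧ (segB cs n fuel i w h).2.2 ≤ n := by
  intro fuel
  induction fuel with
  | zero => intro i w h hi; simp [segB, hi]
  | succ fuel ih =>
    intro i w h hi
    by_cases hin : i < n
    · simp only [segB, if_pos hin]
      by_cases hc : cs.getD i ' ' = ')'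
      · rw [if_pos hc]
        show i ≤ i + 1 ∧ i + 1 ≤ n
        omega
      · rw [if_neg hc]
        by_cases ho : cs.getD i ' ' = '('
        · rw [if_pos ho]
          have h1 := ih (i + 1) 0 0 (by omega)
          have h2 := ih (segB cs n fuel (i+1) 0 0).2.2
            (w + digitAt cs ((i : Int) - 1) * (segB cs n fuel (i+1) 0 0).1)
            (h + digitAt cs ((i : Int) - 1) * (segB cs n fuel (i+1) 0 0).2.1) h1.2
          exact ⟨by omega, h2.2⟩
        · rw [if_neg ho]
          have h1 := ih (i + 1)
            (w + ((if cs.getD i ' ' = 'E' then 1 else 0) - (if cs.getD i ' ' = 'W' then 1 else 0)))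
            (h + ((if cs.getD i ' ' = 'S' then 1 else 0) - (if cs.getD i ' ' = 'N' then 1 else 0)))
            (by omega)
          exact ⟨by omega, h1.2⟩
    · simp only [segB, if_neg hin]; exact ⟨le_refl _, hi⟩

theorem segB_idx_lt (cs : List Char) (n : Nat) (fuel i : Nat) (w h : Int)
    (hin : i < n) (hf : 1 ≤ fuel) : i < (segB cs n fuel i w h).2.2 := by
  cases fuel with
  | zero => omega
  | succ fuel =>
    simp only [segB, if_pos hin]
    by_cases hc : cs.getD i ' ' = ')'
    · rw [if_pos hc]; show i < i + 1; omega
    · rw [if_neg hc]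
      by_cases ho : cs.getD i ' ' = '('
      · rw [if_pos ho]
        have h1 := segB_idx cs n fuel (i + 1) 0 0 (by omega)
        have h2 := segB_idx cs n fuel (segB cs n fuel (i+1) 0 0).2.2
          (w + digitAt cs ((i : Int) - 1) * (segB cs n fuel (i+1) 0 0).1)
          (h + digitAt cs ((i : Int) - 1) * (segB cs n fuel (i+1) 0 0).2.1) h1.2
        omega
      · rw [if_neg ho]
        have h1 := segB_idx cs n fuel (i + 1)
          (w + ((if cs.getD i ' ' = 'E' then 1 else 0) - (if cs.getD i ' ' = 'W' then 1 else 0)))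
          (h + ((if cs.getD i ' ' = 'S' then 1 else 0) - (if cs.getD i ' ' = 'N' then 1 else 0)))
          (by omega)
        omega

-- the accumulator of segB is a pure translation
theorem segB_shift (cs : List Char) (n : Nat) :
    ∀ fuel i (w h : Int),
      segB cs n fuel i w h =
        (w + (segB cs n fuel i 0 0).1, h + (segB cs n fuel i 0 0).2.1,
         (segB cs n fuel i 0 0).2.2) := by
  intro fuel
  induction fuel with
  | zero => intro i w h; simp [segB]
  | succ fuel ih =>
    intro i w h
    by_cases hin : i < n
    · simp only [segB, if_pos hin]
      by_cases hc : cs.getD i ' ' = ')'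
      · rw [if_pos hc, if_pos hc]; simp
      · rw [if_neg hc, if_neg hc]
        by_cases ho : cs.getD i ' ' = '('
        · rw [if_pos ho, if_pos ho]
          rw [ih (segB cs n fuel (i+1) 0 0).2.2
               (w + digitAt cs ((i : Int) - 1) * (segB cs n fuel (i+1) 0 0).1)
               (h + digitAt cs ((i : Int) - 1) * (segB cs n fuel (i+1) 0 0).2.1),
             ih (segB cs n fuel (i+1) 0 0).2.2
               (0 + digitAt cs ((i : Int) - 1) * (segB cs n fuel (i+1) 0 0).1)
               (0 + digitAt cs ((i : Int) - 1) * (segB cs n fuel (i+1) 0 0).2.1)]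
          simp only [Prod.mk.injEq]
          refine ⟨by ring, by ring, trivial⟩
        · rw [if_neg ho, if_neg ho]
          rw [ih (i + 1)
               (w + ((if cs.getD i ' ' = 'E' then 1 else 0) - (if cs.getD i ' ' = 'W' then 1 else 0)))
               (h + ((if cs.getD i ' ' = 'S' then 1 else 0) - (if cs.getD i ' ' = 'N' then 1 else 0))),
             ih (i + 1)
               (0 + ((if cs.getD i ' ' = 'E' then 1 else 0) - (if cs.getD i ' ' = 'W' then 1 else 0)))
               (0 + ((if cs.getD i ' ' = 'S' then 1 else 0) - (if cs.getD i ' ' = 'N' then 1 else 0)))]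
          simp only [Prod.mk.injEq]
          refine ⟨by ring, by ring, trivial⟩
    · simp only [segB, if_neg hin]; simp

-- main segment lemma: a run of segB corresponds to a stretch of loopA
theorem seg_main (cs : List Char)
    (hd : ∀ j, j < cs.length → cs[j]? = some '(' →
        isMult (PySem.List.pyGet? cs ((j : Int) - 1)) = true) :
    ∀ fuel i (w h : Int) (depth : List Int),
      i ≤ cs.length → cs.length - i < fuel →
      (∀ d ∈ depth, 1 ≤ d) →
      ((segB cs cs.length fuel i 0 0).2.2 = cs.length ∧
        loopA cs (cs.drop i) i w h depth depth.prod =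
          (w + depth.prod * (segB cs cs.length fuel i 0 0).1,
           h + depth.prod * (segB cs cs.length fuel i 0 0).2.1)) ∨
      (loopA cs (cs.drop i) i w h depth depth.prod =
        loopA cs (cs.drop (segB cs cs.length fuel i 0 0).2.2)
          (segB cs cs.length fuel i 0 0).2.2
          (w + depth.prod * (segB cs cs.length fuel i 0 0).1)
          (h + depth.prod * (segB cs cs.length fuel i 0 0).2.1)
          depth.dropLast depth.dropLast.prod) := by
  intro fuel
  induction fuel with
  | zero => intro i w h depth hi hf hpos; omega
  | succ fuel ih =>
    intro i w h depth hi hf hpos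
    by_cases hin : i < cs.length
    case neg =>
      have hieq : i = cs.length := by omega
      subst hieq
      left
      have hs0 : segB cs cs.length (fuel + 1) cs.length 0 0 = (0, 0, cs.length) := by
        simp [segB]
      rw [hs0]
      refine ⟨rfl, ?_⟩
      simp [List.drop_length, loopA]
    case pos =>
    have hcons : cs.drop i = cs.getD i ' ' :: cs.drop (i + 1) := by
      rw [List.getD_eq_getElem _ _ hin]
      exact (List.getElem_cons_drop hin).symm
    by_cases hc : cs.getD i ' ' = ')'
    · -- an unmatched ')' closes the segment
      have hseg : segB cs cs.length (fuel + 1) i 0 0 = (0, 0, i + 1) := by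
        simp only [segB, if_pos hin]; rw [if_pos hc]
      right
      rw [hseg, hcons, hc]
      rcases List.eq_nil_or_concat depth with hnil | ⟨dl, last, hconcat⟩
      · subst hnil
        simp [loopA]
      · subst hconcat
        have hlast : (1 : Int) ≤ last := hpos last (by simp)
        have hfd : PySem.Int.floordiv (dl.prod * last) last = dl.prod := by
          rw [PySem.Int.floordiv_eq_ediv_of_pos (by omega)]
          exact Int.mul_ediv_cancel _ (by omega)
        simp [loopA, List.concat_eq_append, hfd]
    · rw [hcons] at *
      by_cases ho : cs.getD i ' ' = '('
      · -- a nested group: evaluate it recursively, then the rest of the segment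
        have hdig := hd i hin (by rw [List.getElem?_eq_getElem hin, ← List.getD_eq_getElem _ ' ' hin, ho])
        obtain ⟨ch, hch, hch1, hch9⟩ : ∃ ch, PySem.List.pyGet? cs ((i : Int) - 1) = some ch ∧
            49 ≤ ch.toNat ∧ ch.toNat ≤ 57 := by
          unfold isMult at hdig
          cases hg : PySem.List.pyGet? cs ((i : Int) - 1) with
          | none => rw [hg] at hdig; simp at hdig
          | some c2 => rw [hg] at hdig; exact ⟨c2, rfl, by simpa using of_decide_eq_true hdig⟩
        have hd1 : 1 ≤ digitAt cs ((i : Int) - 1) := by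
          simp only [digitAt, hch]; omega
        set d := digitAt cs ((i : Int) - 1) with hddef
        set r := segB cs cs.length fuel (i + 1) 0 0 with hrdef
        set s := segB cs cs.length fuel r.2.2 0 0 with hsdef
        have hseg : segB cs cs.length (fuel + 1) i 0 0 = (d * r.1 + s.1, d * r.2.1 + s.2.1, s.2.2) := by
          simp only [segB, if_pos hin]
          rw [if_neg hc, if_pos ho, ← hddef, ← hrdef,
            segB_shift cs cs.length fuel r.2.2 (0 + d * r.1) (0 + d * r.2.1), ← hsdef]
          simp only [Prod.mk.injEq]
          refine ⟨by ring, by ring, trivial⟩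
        have hstepA : loopA cs (cs.getD i ' ' :: cs.drop (i + 1)) i w h depth depth.prod =
            loopA cs (cs.drop (i + 1)) (i + 1) w h (depth ++ [d]) (depth ++ [d]).prod := by
          rw [ho]
          simp [loopA, List.prod_append, ← hddef]
        have hrb := segB_idx cs cs.length fuel (i + 1) 0 0 (by omega)
        rw [← hrdef] at hrb
        have hpos' : ∀ x ∈ depth ++ [d], 1 ≤ x := by
          intro x hx
          rcases List.mem_append.mp hx with hx | hx
          · exact hpos x hx
          · simpa using (List.mem_singleton.mp hx) ▸ hd1
        have ihr := ih (i + 1) w h (depth ++ [d]) (by omega) (by omega) hpos'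
        rw [← hrdef] at ihr
        rcases ihr with ⟨hrend, hreq⟩ | hreq
        · -- the nested group runs to the end of the string
          have hs0 : s = (0, 0, cs.length) := by
            rw [hsdef, hrend]; cases fuel <;> simp [segB]
          left
          rw [hseg, hs0]
          refine ⟨rfl, ?_⟩
          rw [hstepA, hreq, List.prod_append, List.prod_cons, List.prod_nil, mul_one]
          simp only [Prod.mk.injEq]
          constructor <;> ring
        · -- the nested group closes; continue with the rest of the segment
          rw [List.dropLast_concat, List.prod_append, List.prod_cons, List.prod_nil, mul_one] at hreq
          have ihs := ih r.2.2 (w + depth.prod * d * r.1) (h + depth.prod * d * r.2.1) depth hrb.2 (by omega) hpos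
          rw [← hsdef] at ihs
          rcases ihs with ⟨hsend, hseq⟩ | hseq
          · left
            rw [hseg]
            refine ⟨hsend, ?_⟩
            rw [hstepA, List.prod_append, List.prod_cons, List.prod_nil, mul_one, hreq, hseq]
            simp only [Prod.mk.injEq]
            constructor <;> ring
          · right
            rw [hseg]
            rw [hstepA, List.prod_append, List.prod_cons, List.prod_nil, mul_one, hreq, hseq]
            have e1 : w + depth.prod * d * r.1 + depth.prod * s.1 = w + depth.prod * (d * r.1 + s.1) := by ring
            have e2 : h + depth.prod * d * r.2.1 + depth.prod * s.2.1 = h + depth.prod * (d * r.2.1 + s.2.1) := by ring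
            rw [e1, e2]
      · -- a plain character: a unit move (or ignored char), then the rest
        set c := cs.getD i ' ' with hcdef
        set dw : Int := (if c = 'E' then 1 else 0) - (if c = 'W' then 1 else 0) with hdwdef
        set dh : Int := (if c = 'S' then 1 else 0) - (if c = 'N' then 1 else 0) with hdhdef
        set t := segB cs cs.length fuel (i + 1) 0 0 with htdef
        have hseg : segB cs cs.length (fuel + 1) i 0 0 = (dw + t.1, dh + t.2.1, t.2.2) := by
          simp only [segB, if_pos hin]
          rw [if_neg hc, if_neg ho, ← hcdef, ← hdwdef, ← hdhdef,
            segB_shift cs cs.length fuel (i + 1) (0 + dw) (0 + dh), ← htdef]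
          simp only [Prod.mk.injEq]
          refine ⟨by ring, by ring, trivial⟩
        have hstepA : loopA cs (c :: cs.drop (i + 1)) i w h depth depth.prod =
            loopA cs (cs.drop (i + 1)) (i + 1) (w + depth.prod * dw) (h + depth.prod * dh) depth depth.prod := by
          simp only [loopA, if_neg ho, if_neg hc]
          have ew : (if c = 'E' then (if c = 'W' then w - depth.prod else w) + depth.prod
              else (if c = 'W' then w - depth.prod else w)) = w + depth.prod * dw := by
            rw [hdwdef]; split_ifs <;> ring
          have ns : (if c = 'S' then (if c = 'N' then h - depth.prod else h) + depth.prod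
              else (if c = 'N' then h - depth.prod else h)) = h + depth.prod * dh := by
            rw [hdhdef]; split_ifs <;> ring
          rw [ew, ns]
        have iht := ih (i + 1) (w + depth.prod * dw) (h + depth.prod * dh) depth (by omega) (by omega) hpos
        rw [← htdef] at iht
        rcases iht with ⟨htend, hteq⟩ | hteq
        · left
          rw [hseg]
          refine ⟨htend, ?_⟩
          rw [hstepA, hteq]
          simp only [Prod.mk.injEq]
          constructor <;> ring
        · right
          rw [hseg, hstepA, hteq]
          have e1 : w + depth.prod * dw + depth.prod * t.1 = w + depth.prod * (dw + t.1) := by ring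
          have e2 : h + depth.prod * dh + depth.prod * t.2.1 = h + depth.prod * (dh + t.2.1) := by ring
          rw [e1, e2]

-- top-level lemma
theorem top_main (cs : List Char)
    (hd : ∀ j, j < cs.length → cs[j]? = some '(' →
        isMult (PySem.List.pyGet? cs ((j : Int) - 1)) = true) :
    ∀ fuel i (w h : Int) (depth : List Int),
      (depth = [1] ∨ depth = []) → i ≤ cs.length → cs.length - i < fuel →
      loopA cs (cs.drop i) i w h depth depth.prod =
        topB cs cs.length fuel i w h := by
  intro fuel
  induction fuel with
  | zero => intro i w h depth hdep hi hf; omega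
  | succ fuel ih =>
    intro i w h depth hdep hi hf
    by_cases hin : i < cs.length
    · have hpos : ∀ d ∈ depth, 1 ≤ d := by
        rcases hdep with hdep | hdep <;> subst hdep <;> simp
      have hone : depth.prod = 1 := by
        rcases hdep with hdep | hdep <;> subst hdep <;> simp
      have hdrop : depth.dropLast = [] := by
        rcases hdep with hdep | hdep <;> subst hdep <;> simp
      set r := segB cs cs.length (cs.length + 1) i 0 0 with hrdef
      have hlt : i < r.2.2 := segB_idx_lt cs cs.length _ i 0 0 hin (by omega)
      have hle : r.2.2 ≤ cs.length := (segB_idx cs cs.length _ i 0 0 (by omega)).2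
      have htop : topB cs cs.length (fuel + 1) i w h = topB cs cs.length fuel r.2.2 (w + r.1) (h + r.2.1) := by
        simp only [topB, if_pos hin, ← hrdef]
      have hend : ∀ f (w' h' : Int), topB cs cs.length f cs.length w' h' = (w', h') := by
        intro f w' h'; cases f <;> simp [topB]
      have main := seg_main cs hd (cs.length + 1) i w h depth hi (by omega) hpos
      rw [← hrdef, hone] at main
      simp only [one_mul] at main
      rw [hone]
      rcases main with ⟨hrend, heq⟩ | heq
      · rw [heq, htop, hrend, hend]
      · rw [heq, htop, hdrop]
        have := ih r.2.2 (w + r.1) (h + r.2.1) ([] : List Int) (Or.inr rfl) hle (by omega)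
        simpa using this
    · have hieq : i = cs.length := by omega
      subst hieq
      cases fuel <;> simp [topB, List.drop_length, loopA]

-- ===== VERDICT (by name: the statement is the Claim_ definition above) =====
theorem solve_spec : Claim_equal_solve := by
  intro strr _ hpre
  unfold Spec_solve solve solve_alt
  obtain ⟨h1, h2⟩ := hpre
  have key := top_main strr.toList h1 (strr.toList.length + 1) 0 0 0 [1] (Or.inl rfl)
    (by omega) (by omega)
  simp only [List.drop_zero, List.prod_cons, List.prod_nil, mul_one] at key
  show (PySem.Int.mod (loopA strr.toList strr.toList 0 0 0 [1] 1).1 (10 ^ 9),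
        PySem.Int.mod (loopA strr.toList strr.toList 0 0 0 [1] 1).2 (10 ^ 9)) =
       (PySem.Int.mod (topB strr.toList strr.toList.length (strr.toList.length + 1) 0 0 0).1 (10 ^ 9),
        PySem.Int.mod (topB strr.toList strr.toList.length (strr.toList.length + 1) 0 0 0).2 (10 ^ 9))
  rw [key]
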